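-- pv_equiv track=rewrite | github.com/uestla/ProjectEulerPython | pe35.py | get_circular_prime_candidates
-- ===== SOURCE A (Python) =====
-- def get_circular_prime_candidates(limit: int) -> dict[int, bool]:
--     candidates = {2: True}
--
--     sieve = [True] * limit
--
--     for n in range(3, limit, 2):
--         if sieve[n]:
--             sn = str(n)
--             if n == 2 or ('0' not in sn and '2' not in sn and '4' not in sn and '6' not in sn and '8' not in sn):
--                 candidates[n] = True
--
--             m = n * n
--
--             while m < limit:
--                 sieve[m] = False
--                 m += n
--
--     return candidates
-- ===== SOURCE B (Python) =====
-- def _is_prime_odd(n):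
--     d = 3
--     while d * d <= n:
--         if n % d == 0:
--             return False
--         d += 2
--     return True
--
--
-- def get_circular_prime_candidates(limit: int) -> dict[int, bool]:
--     candidates = {2: True}
--     for n in range(3, limit, 2):
--         if _is_prime_odd(n) and all(c not in '02468' for c in str(n)):
--             candidates[n] = True
--     return candidates
-- ===== Notes on version B (the rewrite author's own statement) =====
-- stated objective: simpler
-- what changed: Replaced A's mutable odd-only sieve (cross-off marking of multiples, with state threaded through the loop) by an independent trial-division primality test per odd n, dropping the sieve array entirely.
import Mathlib
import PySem

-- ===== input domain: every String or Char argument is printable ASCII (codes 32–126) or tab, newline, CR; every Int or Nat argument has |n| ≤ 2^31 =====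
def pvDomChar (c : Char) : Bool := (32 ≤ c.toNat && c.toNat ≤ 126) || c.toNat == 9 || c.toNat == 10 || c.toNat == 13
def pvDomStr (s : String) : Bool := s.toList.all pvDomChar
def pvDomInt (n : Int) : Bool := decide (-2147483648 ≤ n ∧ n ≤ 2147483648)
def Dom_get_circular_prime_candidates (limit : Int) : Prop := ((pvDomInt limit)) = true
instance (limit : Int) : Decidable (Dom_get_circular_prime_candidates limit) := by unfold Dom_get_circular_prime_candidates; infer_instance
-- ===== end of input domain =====

-- B replaces A's mutable odd-only sieve (cross-off marking) by independent per-number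
-- trial division, dropping the sieve array entirely (objective: simpler, not faster).

-- ===== PORT A =====
-- inner while loop 'while m < limit: sieve[m] = False; m += n' ('0 < n' in the guard is only
-- for termination; every call site has n ≥ 3)
def pvMark (sieve : List Bool) (limit n m : Int) : List Bool :=
  if _h : m < limit ∧ 0 < n then
    pvMark (PySem.List.pySetD sieve m false) limit n (m + n)
  else sieve
termination_by (limit - m).toNat
decreasing_by omega

-- one iteration of A's for-loop body; state = (candidates, sieve).  'sieve[n]' is read with
-- pyGetD: exact here because 0 ≤ 3 ≤ n < limit = len(sieve) at every call site.
def pvStepA (limit : Int) (st : PySem.Dict Int Bool × List Bool) (n : Int) :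
    PySem.Dict Int Bool × List Bool :=
  let (cand, sieve) := st
  if PySem.List.pyGetD sieve n false then
    let sn := PySem.Int.toStr n
    let cand := if (n == 2) || (!(PySem.Str.isIn "0" sn) && !(PySem.Str.isIn "2" sn) &&
        !(PySem.Str.isIn "4" sn) && !(PySem.Str.isIn "6" sn) && !(PySem.Str.isIn "8" sn)) then
        cand.insert n true
      else cand
    (cand, pvMark sieve limit n (n * n))
  else st

def get_circular_prime_candidates (limit : Int) : List (Int × Bool) :=
  let candidates : PySem.Dict Int Bool := PySem.Dict.ofList [(2, true)]
  let sieve := List.replicate limit.toNat true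
  ((PySem.List.pyRange 3 limit 2).foldl (pvStepA limit) (candidates, sieve)).1.items

-- ===== PORT B =====
-- while d * d <= n: if n % d == 0: return False; d += 2  ('3 ≤ d' in the guard is only for
-- termination; d starts at 3 and grows by 2)
def pvIsPrimeOdd (n d : Int) : Bool :=
  if h : d * d ≤ n ∧ 3 ≤ d then
    if PySem.Int.mod n d == 0 then false
    else pvIsPrimeOdd n (d + 2)
  else true
termination_by (n - d).toNat
decreasing_by
  have h3 : 3 * d ≤ d * d := by nlinarith [h.1, h.2]
  omega

-- all(c not in '02468' for c in str(n)); 'c not in "02468"' on the single char c is exactly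
-- list non-membership of c in the five digit characters
def pvNoEvenDigit (n : Int) : Bool :=
  (PySem.Int.toChars n).all (fun c => !(['0', '2', '4', '6', '8'].contains c))

def pvStepB (cand : PySem.Dict Int Bool) (n : Int) : PySem.Dict Int Bool :=
  if pvIsPrimeOdd n 3 && pvNoEvenDigit n then cand.insert n true else cand

def get_circular_prime_candidates_alt (limit : Int) : List (Int × Bool) :=
  ((PySem.List.pyRange 3 limit 2).foldl pvStepB (PySem.Dict.ofList [(2, true)])).items

-- ===== PRECONDITION & SPEC =====
def Spec_get_circular_prime_candidates (limit : Int) (out : List (Int × Bool)) : Prop := out = get_circular_prime_candidates_alt limit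
instance (limit : Int) (out : List (Int × Bool)) : Decidable (Spec_get_circular_prime_candidates limit out) := by unfold Spec_get_circular_prime_candidates; infer_instance

-- ===== CLAIM (what is proved, stated in full; the proofs are below) =====
def Claim_equal_get_circular_prime_candidates : Prop := ∀ (limit : Int), Dom_get_circular_prime_candidates limit → Spec_get_circular_prime_candidates limit (get_circular_prime_candidates limit)

-- ===== LEMMAS AND PROOFS =====

-- k (an index into the sieve) has been crossed off after A has processed the odd values 3, 5, …
-- strictly below n
def pvMarked (n : Int) (k : Nat) : Prop :=
  ∃ d : Int, 3 ≤ d ∧ d < n ∧ d % 2 = 1 ∧ d * d ≤ (k : Int) ∧ d ∣ (k : Int)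

lemma pvMark_length (sieve : List Bool) (limit n m : Int) :
    (pvMark sieve limit n m).length = sieve.length := by
  rw [pvMark]
  split
  · rw [pvMark_length, PySem.List.length_pySetD]
  · rfl
termination_by (limit - m).toNat
decreasing_by omega

lemma pvMark_getD (limit n : Int) (hn : 0 < n) (m : Int) (s : List Bool)
    (hm : 0 ≤ m) (hs : s.length = limit.toNat) (k : Nat) (hk : k < limit.toNat) :
    ((pvMark s limit n m).getD k false = true ↔
      (s.getD k false = true ∧ ¬(m ≤ (k : Int) ∧ n ∣ (k : Int) - m))) := by
  rw [pvMark]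
  split
  · rename_i hg
    rw [PySem.List.pySetD_of_nonneg _ _ hm]
    rw [pvMark_getD limit n hn (m + n) _ (by omega) (by rw [List.length_set]; exact hs) k hk]
    have hset : (s.set m.toNat false).getD k false =
        if m.toNat = k then false else s.getD k false := by
      rw [List.getD_eq_getElem?_getD, List.getElem?_set, List.getD_eq_getElem?_getD]
      split
      · rw [if_pos (show m.toNat < s.length by omega)]
        rfl
      · rfl
    rw [hset]
    have hdvd : (n ∣ (k : Int) - (m + n)) ↔ n ∣ (k : Int) - m := by
      constructor
      · intro hd
        have h2 := dvd_add hd (dvd_refl n)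
        rwa [show (k : Int) - (m + n) + n = (k : Int) - m by ring] at h2
      · intro hd
        have h2 := dvd_sub hd (dvd_refl n)
        rwa [show (k : Int) - m - n = (k : Int) - (m + n) by ring] at h2
    by_cases hkm : m.toNat = k
    · have hk' : (k : Int) = m := by omega
      simp [hkm, hk']
    · rw [if_neg hkm]
      have hk' : (k : Int) ≠ m := by omega
      rw [hdvd]
      constructor
      · rintro ⟨h1, h2⟩
        refine ⟨h1, fun ⟨h3, h4⟩ => h2 ⟨?_, h4⟩⟩
        have := Int.le_of_dvd (by omega) h4
        omega
      · rintro ⟨h1, h2⟩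
        exact ⟨h1, fun ⟨h3, h4⟩ => h2 ⟨by omega, h4⟩⟩
  · rename_i hg
    have hnk : ¬(m ≤ (k : Int) ∧ n ∣ (k : Int) - m) := by
      rintro ⟨h1, -⟩
      omega
    simp [hnk]
termination_by (limit - m).toNat
decreasing_by omega

lemma pvIsPrime_iff (n : Int) (d0 : Int) (h3 : 3 ≤ d0) (hodd : d0 % 2 = 1) :
    (pvIsPrimeOdd n d0 = true ↔ ¬ ∃ d : Int, d0 ≤ d ∧ d % 2 = 1 ∧ d * d ≤ n ∧ d ∣ n) := by
  rw [pvIsPrimeOdd]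
  split
  · rename_i hg
    by_cases hd : PySem.Int.mod n d0 == 0
    · rw [if_pos hd]
      have hdvd : d0 ∣ n := by
        rw [← PySem.Int.mod_eq_zero_iff_dvd]
        exact beq_iff_eq.mp hd
      simp only [Bool.false_eq_true, false_iff, not_not]
      exact ⟨d0, le_refl d0, hodd, hg.1, hdvd⟩
    · rw [if_neg hd]
      have hndvd : ¬ d0 ∣ n := by
        rw [← PySem.Int.mod_eq_zero_iff_dvd]
        intro h0
        exact hd (by rw [h0]; rfl)
      have h3d : 3 * d0 ≤ d0 * d0 := by nlinarith [hg.1, hg.2]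
      rw [pvIsPrime_iff n (d0 + 2) (by omega) (by omega)]
      constructor
      · rintro hno ⟨d, hdle, hdodd, hdsq, hddvd⟩
        rcases eq_or_lt_of_le hdle with heq | hlt
        · exact hndvd (heq ▸ hddvd)
        · exact hno ⟨d, by omega, hdodd, hdsq, hddvd⟩
      · rintro hno ⟨d, hdle, hdodd, hdsq, hddvd⟩
        exact hno ⟨d, by omega, hdodd, hdsq, hddvd⟩
  · rename_i hg
    simp only [true_iff]
    rintro ⟨d, hdle, hdodd, hdsq, hddvd⟩
    have : d0 * d0 ≤ d * d := by nlinarith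
    have : d0 * d0 ≤ n := le_trans this hdsq
    exact hg ⟨this, h3⟩
termination_by (n - d0).toNat
decreasing_by
  omega

lemma pvPrime_eq_not_marked (n : Int) (hn : 3 ≤ n) :
    (pvIsPrimeOdd n 3 = true ↔ ¬ pvMarked n n.toNat) := by
  rw [pvIsPrime_iff n 3 (by norm_num) (by decide)]
  unfold pvMarked
  rw [show ((n.toNat : Int)) = n by omega]
  constructor
  · rintro hno ⟨d, hd3, hdlt, hdodd, hdsq, hddvd⟩
    exact hno ⟨d, hd3, hdodd, hdsq, hddvd⟩
  · rintro hno ⟨d, hd3, hdodd, hdsq, hddvd⟩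
    have hdn : d < n := by nlinarith
    exact hno ⟨d, hd3, hdn, hdodd, hdsq, hddvd⟩

lemma pvMarked_step_prime (n : Int) (hn : 3 ≤ n) (hodd : n % 2 = 1) (k : Nat) :
    pvMarked (n + 2) k ↔ pvMarked n k ∨ (n * n ≤ (k : Int) ∧ n ∣ (k : Int)) := by
  constructor
  · rintro ⟨d, hd3, hdlt, hdodd, hdsq, hddvd⟩
    rcases lt_or_ge d n with h | h
    · exact Or.inl ⟨d, hd3, h, hdodd, hdsq, hddvd⟩
    · have hdn : d = n := by omega
      exact Or.inr ⟨hdn ▸ hdsq, hdn ▸ hddvd⟩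
  · rintro (⟨d, hd3, hdlt, hdodd, hdsq, hddvd⟩ | ⟨hsq, hdvd⟩)
    · exact ⟨d, hd3, by omega, hdodd, hdsq, hddvd⟩
    · exact ⟨n, hn, by omega, hodd, hsq, hdvd⟩

lemma pvMarked_step_composite (n : Int) (hn : 3 ≤ n) (hodd : n % 2 = 1)
    (hm : pvMarked n n.toNat) (k : Nat) : pvMarked (n + 2) k ↔ pvMarked n k := by
  rcases hm with ⟨e, he3, helt, heodd, hesq, hedvd⟩
  rw [show ((n.toNat : Int)) = n by omega] at hesq hedvd
  constructor
  · rintro ⟨d, hd3, hdlt, hdodd, hdsq, hddvd⟩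
    rcases lt_or_ge d n with h | h
    · exact ⟨d, hd3, h, hdodd, hdsq, hddvd⟩
    · have hdn : d = n := by omega
      subst hdn
      refine ⟨e, he3, helt, heodd, ?_, dvd_trans hedvd hddvd⟩
      have h1 : d ≤ d * d := by nlinarith
      omega
  · rintro ⟨d, hd3, hdlt, hdodd, hdsq, hddvd⟩
    exact ⟨d, hd3, by omega, hdodd, hdsq, hddvd⟩

lemma pvDigits_eq (n : Int) (hn : 3 ≤ n) :
    ((n == 2) || (!(PySem.Str.isIn "0" (PySem.Int.toStr n)) && !(PySem.Str.isIn "2" (PySem.Int.toStr n)) &&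
      !(PySem.Str.isIn "4" (PySem.Int.toStr n)) && !(PySem.Str.isIn "6" (PySem.Int.toStr n)) &&
      !(PySem.Str.isIn "8" (PySem.Int.toStr n)))) = pvNoEvenDigit n := by
  have hne : (n == 2) = false := by
    simp only [beq_eq_false_iff_ne, ne_eq]
    omega
  have hs : ∀ c : Char, (PySem.Str.isIn (String.ofList [c]) (PySem.Int.toStr n) = false) ↔
      c ∉ PySem.Int.toChars n := by
    intro c
    constructor
    · intro hfalse hmem
      have htrue : PySem.Str.isIn (String.ofList [c]) (PySem.Int.toStr n) = true := by
        rw [PySem.Str.isIn_iff_infix]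
        have h1 : (String.ofList [c]).toList = [c] := by simp
        rw [h1, PySem.Int.toList_toStr]
        exact (List.singleton_infix_iff c _).mpr hmem
      rw [htrue] at hfalse
      cases hfalse
    · intro hmem
      rw [← Bool.not_eq_true, PySem.Str.isIn_iff_infix]
      intro hinf
      apply hmem
      have h1 : (String.ofList [c]).toList = [c] := by simp
      rw [h1, PySem.Int.toList_toStr] at hinf
      exact (List.singleton_infix_iff c _).mp hinf
  rw [hne, Bool.false_or, pvNoEvenDigit, Bool.eq_iff_iff]
  simp only [Bool.and_eq_true, Bool.not_eq_true', List.all_eq_true, List.contains_eq_mem]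
  rw [show ("0" : String) = String.ofList ['0'] from rfl,
    show ("2" : String) = String.ofList ['2'] from rfl,
    show ("4" : String) = String.ofList ['4'] from rfl,
    show ("6" : String) = String.ofList ['6'] from rfl,
    show ("8" : String) = String.ofList ['8'] from rfl]
  simp only [hs]
  constructor
  · rintro ⟨⟨⟨⟨h0, h2⟩, h4⟩, h6⟩, h8⟩ x hx
    simp only [decide_eq_false_iff_not, List.mem_cons, List.not_mem_nil, or_false]
    rintro (rfl | rfl | rfl | rfl | rfl) <;>
      first | exact h0 hx | exact h2 hx | exact h4 hx | exact h6 hx | exact h8 hx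
  · intro h
    refine ⟨⟨⟨⟨?_, ?_⟩, ?_⟩, ?_⟩, ?_⟩ <;>
      · intro hmem
        have h2 := h _ hmem
        simp at h2

lemma pvRange_two_nil (a b : Int) (h : b ≤ a) : PySem.List.pyRange a b 2 = [] := by
  rw [PySem.List.pyRange_of_pos a b (by norm_num)]
  simp [show ¬ a < b by omega]

lemma pvRange_two_cons (a b : Int) (h : a < b) :
    PySem.List.pyRange a b 2 = a :: PySem.List.pyRange (a + 2) b 2 := by
  rw [PySem.List.pyRange_of_pos a b (by norm_num), PySem.List.pyRange_of_pos (a+2) b (by norm_num)]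
  by_cases h2 : a + 2 < b
  · rw [if_pos h, if_pos h2]
    have hc : ((b - a + 2 - 1) / 2).toNat = ((b - (a+2) + 2 - 1) / 2).toNat + 1 := by omega
    rw [hc, List.range_succ_eq_map, List.map_cons, List.map_map]
    congr 1
    · norm_num
    · apply List.map_congr_left
      intro k _
      simp [Function.comp, Nat.succ_eq_add_one]
      ring
  · rw [if_pos h, if_neg h2]
    have hc : ((b - a + 2 - 1) / 2).toNat = 1 := by omega
    rw [hc]
    simp

lemma pvLoop (limit n : Int) (cand : PySem.Dict Int Bool) (s : List Bool)
    (hn3 : 3 ≤ n) (hodd : n % 2 = 1) (hlen : s.length = limit.toNat)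
    (hinv : ∀ k : Nat, k < limit.toNat → (s.getD k false = true ↔ ¬ pvMarked n k)) :
    ((PySem.List.pyRange n limit 2).foldl (pvStepA limit) (cand, s)).1 =
      (PySem.List.pyRange n limit 2).foldl pvStepB cand := by
  by_cases hb : n < limit
  case neg =>
    rw [pvRange_two_nil n limit (by omega)]
    rfl
  case pos =>
    rw [pvRange_two_cons n limit hb]
    simp only [List.foldl_cons]
    have hnn : n.toNat < limit.toNat := by omega
    have hread : PySem.List.pyGetD s n false = s.getD n.toNat false :=
      PySem.List.pyGetD_of_nonneg s false (by omega)
    have hiff := hinv n.toNat hnn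
    by_cases hp : s.getD n.toNat false = true
    case pos =>
      have hnm : ¬ pvMarked n n.toNat := hiff.mp hp
      have hprime : pvIsPrimeOdd n 3 = true := (pvPrime_eq_not_marked n hn3).mpr hnm
      have hA : pvStepA limit (cand, s) n =
          ((if pvNoEvenDigit n then cand.insert n true else cand), pvMark s limit n (n * n)) := by
        simp only [pvStepA, hread, hp, if_true]
        rw [pvDigits_eq n hn3]
      have hB : pvStepB cand n = (if pvNoEvenDigit n then cand.insert n true else cand) := by
        rw [pvStepB, hprime]
        simp
      rw [hA, hB]
      apply pvLoop limit (n + 2) _ _ (by omega) (by omega) (by rw [pvMark_length]; exact hlen)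
      intro k hk
      rw [pvMark_getD limit n (by omega) (n * n) s (by positivity) hlen k hk]
      rw [hinv k hk]
      have hdvd2 : (n ∣ (k : Int) - n * n) ↔ n ∣ (k : Int) := by
        constructor
        · intro h
          have h2 := dvd_add h (⟨n, rfl⟩ : n ∣ n * n)
          rwa [show (k : Int) - n * n + n * n = (k : Int) by ring] at h2
        · intro h
          exact dvd_sub h ⟨n, rfl⟩
      rw [hdvd2, pvMarked_step_prime n hn3 hodd k]
      tauto
    case neg =>
      have hp' : s.getD n.toNat false = false := by simpa using hp
      have hm : pvMarked n n.toNat := by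
        by_contra hc
        exact hp (hiff.mpr hc)
      have hprime : pvIsPrimeOdd n 3 = false := by
        by_contra hc
        exact ((pvPrime_eq_not_marked n hn3).mp (by simpa using hc)) hm
      have hA : pvStepA limit (cand, s) n = (cand, s) := by
        simp only [pvStepA, hread, hp', Bool.false_eq_true, if_false]
      have hB : pvStepB cand n = cand := by
        rw [pvStepB, hprime]
        simp
      rw [hA, hB]
      apply pvLoop limit (n + 2) _ _ (by omega) (by omega) hlen
      intro k hk
      rw [hinv k hk, pvMarked_step_composite n hn3 hodd hm k]
termination_by (limit - n).toNat
decreasing_by all_goals omega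

-- ===== VERDICT (by name: the statement is the Claim_ definition above) =====
theorem get_circular_prime_candidates_spec : Claim_equal_get_circular_prime_candidates := by
  intro limit _hdom
  unfold Spec_get_circular_prime_candidates get_circular_prime_candidates get_circular_prime_candidates_alt
  have h := pvLoop limit 3 (PySem.Dict.ofList [(2, true)]) (List.replicate limit.toNat true)
    (by norm_num) (by decide) (by simp)
    (by
      intro k hk
      constructor
      · rintro - ⟨d, hd3, hdlt, -⟩; omega
      · rintro -
        simp [List.getD_eq_getElem?_getD, hk])
  simp only [h]
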